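-- pv_equiv track=rewrite | github.com/letsRidePonyBoy/Lewis | lewis.py | ele
-- ===== SOURCE A (Python) =====
-- def ele(molecule):
--     n = ""
--     lst = []
--     cap = 'HLNKGRICTFMCBSPAYWZOVUX'
--     for c in molecule:
--         if c in cap:
--             if n:
--                 lst.append(n)
--                 n = c
--             else:
--                 n += c
--         else:
--             n += c
--     if n:
--         lst.append(n)
--
--     return lst
-- ===== SOURCE B (Python) =====
-- def ele(molecule):
--     # Two-pointer tokenizer: each token is one leading char plus the maximal
--     # following run of non-capital characters.
--     cap = 'HLNKGRICTFMCBSPAYWZOVUX'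
--     out = []
--     i, L = 0, len(molecule)
--     while i < L:
--         j = i + 1
--         while j < L and molecule[j] not in cap:
--             j += 1
--         out.append(molecule[i:j])
--         i = j
--     return out
-- ===== Notes on version B (the rewrite author's own statement) =====
-- stated objective: alternative
-- what changed: Replaces A's character-by-character accumulator with running token string and flush-on-capital logic by a two-pointer tokenizer that finds each token's end with an inner scan and slices it out in one piece.
import Mathlib
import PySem

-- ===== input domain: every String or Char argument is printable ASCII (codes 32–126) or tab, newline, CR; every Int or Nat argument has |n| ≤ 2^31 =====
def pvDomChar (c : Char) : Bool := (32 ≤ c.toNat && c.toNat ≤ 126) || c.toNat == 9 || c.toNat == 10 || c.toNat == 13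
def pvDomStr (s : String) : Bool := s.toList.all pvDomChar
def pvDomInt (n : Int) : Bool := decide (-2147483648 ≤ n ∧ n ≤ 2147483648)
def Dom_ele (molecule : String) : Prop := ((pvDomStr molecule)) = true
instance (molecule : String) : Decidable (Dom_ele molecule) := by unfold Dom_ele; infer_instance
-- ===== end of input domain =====

-- B replaces A's flush-on-capital accumulator scan by a two-pointer tokenizer (alternative decomposition, same cost).

-- the capital letters A splits on (shared literal of both Pythons)
def eleCap : List Char := "HLNKGRICTFMCBSPAYWZOVUX".toList

-- ===== PORT A =====
-- one step of A's for-loop: state = (n, lst)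
def eleStep (st : List Char × List (List Char)) (c : Char) : List Char × List (List Char) :=
  if eleCap.contains c then
    if st.1 ≠ [] then ([c], st.2 ++ [st.1])
    else (st.1 ++ [c], st.2)
  else (st.1 ++ [c], st.2)

def ele (molecule : String) : List String :=
  let fin := molecule.toList.foldl eleStep ([], [])
  (if fin.1 ≠ [] then fin.2 ++ [fin.1] else fin.2).map String.ofList

-- ===== PORT B =====
-- B's outer while-loop: take one char, then the inner scan (the maximal run of
-- non-capitals) as takeWhile/dropWhile, and recurse at the new position.
def eleTok : List Char → List (List Char)
  | [] => []
  | c :: rest =>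
    (c :: rest.takeWhile (fun d => !eleCap.contains d)) ::
      eleTok (rest.dropWhile (fun d => !eleCap.contains d))
termination_by cs => cs.length
decreasing_by
  simp only [List.length_cons]
  exact Nat.lt_succ_of_le (List.length_dropWhile_le _ _)

def ele_alt (molecule : String) : List String :=
  (eleTok molecule.toList).map String.ofList

-- ===== PRECONDITION & SPEC =====
def Spec_ele (molecule : String) (out : List String) : Prop := out = ele_alt molecule
instance (molecule : String) (out : List String) : Decidable (Spec_ele molecule out) := by unfold Spec_ele; infer_instance

-- ===== CLAIM (what is proved, stated in full; the proofs are below) =====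
def Claim_equal_ele : Prop := ∀ (molecule : String), Dom_ele molecule → Spec_ele molecule (ele molecule)

-- ===== LEMMAS AND PROOFS =====

def eleFin (st : List Char × List (List Char)) : List (List Char) :=
  if st.1 ≠ [] then st.2 ++ [st.1] else st.2

theorem eleTok_nil : eleTok [] = [] := by rw [eleTok]

theorem eleTok_cons (c : Char) (rest : List Char) :
    eleTok (c :: rest) =
      (c :: rest.takeWhile (fun d => !eleCap.contains d)) ::
        eleTok (rest.dropWhile (fun d => !eleCap.contains d)) := by
  rw [eleTok]

-- the already-flushed tokens lst pass through A's loop untouched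
theorem eleFin_foldl_append (cs : List Char) (n : List Char) (lst : List (List Char)) :
    eleFin (cs.foldl eleStep (n, lst)) = lst ++ eleFin (cs.foldl eleStep (n, [])) := by
  induction cs generalizing n lst with
  | nil =>
    simp only [List.foldl_nil, eleFin]
    split_ifs <;> simp
  | cons c cs ih =>
    simp only [List.foldl_cons, eleStep, List.nil_append]
    split_ifs
    · rw [ih [c] (lst ++ [n]), ih [c] [n]]; simp
    · rw [ih (n ++ [c]) lst]
    · rw [ih (n ++ [c]) lst]

-- A's loop from a nonempty running token computes exactly B's tokenization
theorem eleFin_foldl_tok (cs : List Char) (n : List Char) (hn : n ≠ []) :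
    eleFin (cs.foldl eleStep (n, [])) =
      (n ++ cs.takeWhile (fun d => !eleCap.contains d)) ::
        eleTok (cs.dropWhile (fun d => !eleCap.contains d)) := by
  induction cs generalizing n with
  | nil => simp [eleFin, hn, eleTok_nil]
  | cons c cs ih =>
    rw [List.foldl_cons]
    by_cases hc : c ∈ eleCap
    · have hs : eleStep (n, []) c = ([c], [n]) := by simp [eleStep, hn, hc]
      rw [hs, eleFin_foldl_append, ih [c] (by simp),
        List.takeWhile_cons, List.dropWhile_cons]
      simp [hc, eleTok_cons]
      
    · have hs : eleStep (n, []) c = (n ++ [c], []) := by simp [eleStep, hc]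
      rw [hs, ih (n ++ [c]) (by simp), List.takeWhile_cons, List.dropWhile_cons]
      simp [hc]

theorem ele_eq_tok (cs : List Char) :
    eleFin (cs.foldl eleStep ([], [])) = eleTok cs := by
  cases cs with
  | nil => simp [eleFin, eleTok_nil]
  | cons c cs =>
    have hstep : eleStep (([] : List Char), ([] : List (List Char))) c = ([c], []) := by
      simp [eleStep]
    rw [List.foldl_cons, hstep, eleFin_foldl_tok cs [c] (by simp), eleTok_cons]
    simp

-- ===== VERDICT (by name: the statement is the Claim_ definition above) =====
theorem ele_spec : Claim_equal_ele := by
  intro molecule _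
  show (eleFin (molecule.toList.foldl eleStep ([], []))).map String.ofList
      = (eleTok molecule.toList).map String.ofList
  rw [ele_eq_tok]
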